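-- pv_equiv track=rewrite | github.com/OpenBlatam/Automation-StartUps | marketing_brain_influence_advocacy_analyzer.py | _analyze_advocacy_segments
-- ===== SOURCE A (Python) =====
-- def _analyze_advocacy_segments(advocacy_analysis):
--     """Analizar segmentos de advocacy"""
--     advocacy_scores = [data['advocacy_score'] for data in advocacy_analysis.values()]
--
--     # Crear segmentos basados en score de advocacy
--     segments = {
--         'champions': len([score for score in advocacy_scores if score > 100]),
--         'advocates': len([score for score in advocacy_scores if 50 < score <= 100]),
--         'supporters': len([score for score in advocacy_scores if 20 < score <= 50]),
--         'neutrals': len([score for score in advocacy_scores if 5 < score <= 20]),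
--         'detractors': len([score for score in advocacy_scores if score <= 5])
--     }
--
--     return segments
-- ===== SOURCE B (Python) =====
-- def _analyze_advocacy_segments(advocacy_analysis):
--     """Analizar segmentos de advocacy (single classifying pass)"""
--     champions = advocates = supporters = neutrals = detractors = 0
--     for data in advocacy_analysis.values():
--         score = data['advocacy_score']
--         if score > 100:
--             champions += 1
--         elif score > 50:
--             advocates += 1
--         elif score > 20:
--             supporters += 1
--         elif score > 5:
--             neutrals += 1
--         else:
--             detractors += 1
--     return {
--         'champions': champions,
--         'advocates': advocates,
--         'supporters': supporters,
--         'neutrals': neutrals,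
--         'detractors': detractors,
--     }
-- ===== Notes on version B (the rewrite author's own statement) =====
-- stated objective: faster
-- what changed: Replaces the intermediate scores list and five separate filtering comprehensions (six passes over the data) with a single pass that classifies each score into exactly one bucket via an if/elif chain over five counters.
import Mathlib
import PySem

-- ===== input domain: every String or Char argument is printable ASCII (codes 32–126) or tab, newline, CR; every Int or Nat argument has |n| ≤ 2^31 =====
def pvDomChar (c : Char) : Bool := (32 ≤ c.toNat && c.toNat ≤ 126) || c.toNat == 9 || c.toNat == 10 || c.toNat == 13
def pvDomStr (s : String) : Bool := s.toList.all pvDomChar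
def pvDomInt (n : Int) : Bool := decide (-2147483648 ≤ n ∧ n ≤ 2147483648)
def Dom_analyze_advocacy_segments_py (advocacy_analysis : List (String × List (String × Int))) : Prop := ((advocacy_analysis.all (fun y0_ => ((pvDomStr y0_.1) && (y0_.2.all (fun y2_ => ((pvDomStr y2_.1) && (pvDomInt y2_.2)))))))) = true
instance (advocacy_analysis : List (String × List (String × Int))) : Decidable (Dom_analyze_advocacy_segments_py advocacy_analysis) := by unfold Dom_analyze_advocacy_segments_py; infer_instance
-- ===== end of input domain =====

-- B replaces A's six passes (a scores list plus five filtering comprehensions) with one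
-- classifying pass over five counters; same return value on every input where A returns.

-- ===== PORT A =====
-- data['advocacy_score'] : first-match association-list lookup (KeyError excluded by Pre_;
-- the 0 default is never reached under Pre_).
def pvScore (data : List (String × Int)) : Int :=
  (((data.find? (fun q => q.1 == "advocacy_score")).map Prod.snd).getD 0)

def analyze_advocacy_segments_py (advocacy_analysis : List (String × List (String × Int))) : List (String × Int) :=
  let advocacy_scores := advocacy_analysis.map (fun data => pvScore data.2)
  [("champions",  ((advocacy_scores.filter (fun score => decide (100 < score))).length : Int)),
   ("advocates",  ((advocacy_scores.filter (fun score => decide (50 < score ∧ score ≤ 100))).length : Int)),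
   ("supporters", ((advocacy_scores.filter (fun score => decide (20 < score ∧ score ≤ 50))).length : Int)),
   ("neutrals",   ((advocacy_scores.filter (fun score => decide (5 < score ∧ score ≤ 20))).length : Int)),
   ("detractors", ((advocacy_scores.filter (fun score => decide (score ≤ 5))).length : Int))]

-- ===== PORT B =====
-- one step of Source B's if/elif chain over the five counters
def pvBump (st : Int × Int × Int × Int × Int) (score : Int) : Int × Int × Int × Int × Int :=
  let (c, a, s, n, d) := st
  if 100 < score then (c + 1, a, s, n, d)
  else if 50 < score then (c, a + 1, s, n, d)
  else if 20 < score then (c, a, s + 1, n, d)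
  else if 5 < score then (c, a, s, n + 1, d)
  else (c, a, s, n, d + 1)

def analyze_advocacy_segments_py_alt (advocacy_analysis : List (String × List (String × Int))) : List (String × Int) :=
  let (c, a, s, n, d) :=
    advocacy_analysis.foldl (fun st data => pvBump st (pvScore data.2)) (0, 0, 0, 0, 0)
  [("champions", c), ("advocates", a), ("supporters", s), ("neutrals", n), ("detractors", d)]

-- ===== PRECONDITION & SPEC =====
-- Pre_ excludes exactly the inputs on which A raises KeyError: an inner dict without 'advocacy_score'.
def Pre_analyze_advocacy_segments_py (advocacy_analysis : List (String × List (String × Int))) : Prop :=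
  ∀ p ∈ advocacy_analysis, p.2.any (fun q => q.1 == "advocacy_score") = true
instance (advocacy_analysis : List (String × List (String × Int))) : Decidable (Pre_analyze_advocacy_segments_py advocacy_analysis) := by
  unfold Pre_analyze_advocacy_segments_py; infer_instance

def pvWitness_analyze_advocacy_segments_py : (List (String × List (String × Int))) :=
  [("alice", [("advocacy_score", 120)]), ("bob", [("advocacy_score", 3)])]

def Spec_analyze_advocacy_segments_py (advocacy_analysis : List (String × List (String × Int))) (out : List (String × Int)) : Prop := out = analyze_advocacy_segments_py_alt advocacy_analysis
instance (advocacy_analysis : List (String × List (String × Int))) (out : List (String × Int)) : Decidable (Spec_analyze_advocacy_segments_py advocacy_analysis out) := by unfold Spec_analyze_advocacy_segments_py; infer_instance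

-- ===== CLAIM (what is proved, stated in full; the proofs are below) =====
def Claim_equal_analyze_advocacy_segments_py : Prop := ∀ (advocacy_analysis : List (String × List (String × Int))), Dom_analyze_advocacy_segments_py advocacy_analysis → Pre_analyze_advocacy_segments_py advocacy_analysis → Spec_analyze_advocacy_segments_py advocacy_analysis (analyze_advocacy_segments_py advocacy_analysis)

-- ===== LEMMAS AND PROOFS =====
-- Loop invariant for B's fold: from any counter state it adds the bucket counts of the
-- rest of the list, with the buckets phrased exactly as B's if/elif chain tests them.
set_option maxHeartbeats 1000000 in
theorem pvFold_counts (l : List (String × List (String × Int))) (c a s n d : Int) :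
    l.foldl (fun st data => pvBump st (pvScore data.2)) (c, a, s, n, d) =
      (c + ((l.map (fun data => pvScore data.2)).filter (fun sc => decide (100 < sc))).length,
       a + ((l.map (fun data => pvScore data.2)).filter (fun sc => decide (¬ 100 < sc ∧ 50 < sc))).length,
       s + ((l.map (fun data => pvScore data.2)).filter (fun sc => decide (¬ 100 < sc ∧ ¬ 50 < sc ∧ 20 < sc))).length,
       n + ((l.map (fun data => pvScore data.2)).filter (fun sc => decide (¬ 100 < sc ∧ ¬ 50 < sc ∧ ¬ 20 < sc ∧ 5 < sc))).length,
       d + ((l.map (fun data => pvScore data.2)).filter (fun sc => decide (¬ 100 < sc ∧ ¬ 50 < sc ∧ ¬ 20 < sc ∧ ¬ 5 < sc))).length) := by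
  induction l generalizing c a s n d with
  | nil => simp
  | cons x xs ih =>
    simp only [List.foldl_cons, List.map_cons, List.filter_cons]
    rcases lt_or_ge 100 (pvScore x.2) with h1 | h1
    · have hb : pvBump (c, a, s, n, d) (pvScore x.2) = (c + 1, a, s, n, d) := by
        simp [pvBump, h1]
      rw [hb, ih]
      simp only [h1, decide_true, not_true, false_and, decide_false, if_true,
        List.length_cons, Prod.mk.injEq, Nat.cast_add, Nat.cast_one]
      refine ⟨by ring, rfl, rfl, rfl, rfl⟩
    rcases lt_or_ge 50 (pvScore x.2) with h2 | h2
    · have hb : pvBump (c, a, s, n, d) (pvScore x.2) = (c, a + 1, s, n, d) := by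
        simp [pvBump, not_lt.mpr h1, h2]
      rw [hb, ih]
      simp only [Prod.mk.injEq]
      refine ⟨?_, ?_, ?_, ?_, ?_⟩ <;>
        · split_ifs <;> simp_all <;> omega
    rcases lt_or_ge 20 (pvScore x.2) with h3 | h3
    · have hb : pvBump (c, a, s, n, d) (pvScore x.2) = (c, a, s + 1, n, d) := by
        simp [pvBump, not_lt.mpr h1, not_lt.mpr h2, h3]
      rw [hb, ih]
      simp only [Prod.mk.injEq]
      refine ⟨?_, ?_, ?_, ?_, ?_⟩ <;>
        · split_ifs <;> simp_all <;> omega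
    rcases lt_or_ge 5 (pvScore x.2) with h4 | h4
    · have hb : pvBump (c, a, s, n, d) (pvScore x.2) = (c, a, s, n + 1, d) := by
        simp [pvBump, not_lt.mpr h1, not_lt.mpr h2, not_lt.mpr h3, h4]
      rw [hb, ih]
      simp only [Prod.mk.injEq]
      refine ⟨?_, ?_, ?_, ?_, ?_⟩ <;>
        · split_ifs <;> simp_all <;> omega
    · have hb : pvBump (c, a, s, n, d) (pvScore x.2) = (c, a, s, n, d + 1) := by
        simp [pvBump, not_lt.mpr h1, not_lt.mpr h2, not_lt.mpr h3, not_lt.mpr h4]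
      rw [hb, ih]
      simp only [Prod.mk.injEq]
      refine ⟨?_, ?_, ?_, ?_, ?_⟩ <;>
        · split_ifs <;> simp_all <;> omega

-- Each of B's mutually-exclusive bucket conditions agrees pointwise with A's interval test.
theorem pvPred_eq (l : List Int) (p q : Int → Bool) (h : ∀ sc : Int, p sc = q sc) :
    l.filter p = l.filter q :=
  List.filter_congr (fun sc _ => h sc)

-- ===== VERDICT (by name: the statement is the Claim_ definition above) =====
theorem analyze_advocacy_segments_py_spec : Claim_equal_analyze_advocacy_segments_py := by
  intro l _ _
  unfold Spec_analyze_advocacy_segments_py analyze_advocacy_segments_py analyze_advocacy_segments_py_alt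
  rw [pvFold_counts]
  simp only [zero_add, List.cons.injEq, Prod.mk.injEq, and_true, true_and]
  refine ⟨?_, ?_, ?_, ?_⟩ <;>
    exact congrArg (fun k : Nat => (k : Int))
      (congrArg List.length (pvPred_eq _ _ _ (fun sc => by
        simp only [decide_eq_decide]; omega)))
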